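-- pv_equiv track=rewrite | github.com/ibarjasi94/default_process | AME.py | kmvec
-- ===== SOURCE A (Python) =====
-- def kmvec(kmin,kmax):
--     kvec = []
--     for k in range(kmin,kmax+1):
--         for n in range(1,k+2):
--             kvec.append(k)
--     mvec = []
--     for k in range(kmin,kmax+1):
--         for n in range(0,k+1):
--             mvec.append(n)
--     return kvec,mvec
-- ===== SOURCE B (Python) =====
-- def kmvec(kmin, kmax):
--     pairs = ((k, n) for k in range(kmin, kmax + 1) for n in range(k + 1))
--     kvec, mvec = [], []
--     for k, n in pairs:
--         kvec.append(k)
--         mvec.append(n)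
--     return kvec, mvec
-- ===== Notes on version B (the rewrite author's own statement) =====
-- stated objective: alternative
-- what changed: Instead of A's two independent staged passes over the k range, B streams the flat sequence of (k,n) pairs from a single nested generator and unzips it in one pass into the two result vectors.
import Mathlib
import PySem

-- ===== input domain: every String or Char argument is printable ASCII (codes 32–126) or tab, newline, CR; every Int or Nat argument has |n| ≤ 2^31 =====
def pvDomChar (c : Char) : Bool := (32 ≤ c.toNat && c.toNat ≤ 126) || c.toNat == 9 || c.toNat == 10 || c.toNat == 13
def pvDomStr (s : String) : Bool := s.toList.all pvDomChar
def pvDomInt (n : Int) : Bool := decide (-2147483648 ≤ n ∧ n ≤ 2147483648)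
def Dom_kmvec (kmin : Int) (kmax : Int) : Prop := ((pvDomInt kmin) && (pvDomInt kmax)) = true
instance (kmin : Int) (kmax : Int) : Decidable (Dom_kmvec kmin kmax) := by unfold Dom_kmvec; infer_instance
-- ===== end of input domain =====

-- B streams the flat sequence of (k,n) pairs from one nested generator and unzips it in a
-- single pass into the two result vectors, instead of A's two staged passes (objective: alternative).


-- ===== PORT A =====
def kmvec (kmin : Int) (kmax : Int) : List Int × List Int :=
  let kvec : List Int :=
    (PySem.List.pyRange kmin (kmax + 1) 1).foldl
      (fun kv k => (PySem.List.pyRange 1 (k + 2) 1).foldl (fun kv _n => kv ++ [k]) kv) []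
  let mvec : List Int :=
    (PySem.List.pyRange kmin (kmax + 1) 1).foldl
      (fun mv k => (PySem.List.pyRange 0 (k + 1) 1).foldl (fun mv n => mv ++ [n]) mv) []
  (kvec, mvec)

-- ===== PORT B =====
def kmvec_alt (kmin : Int) (kmax : Int) : List Int × List Int :=
  let pairs : List (Int × Int) :=
    (PySem.List.pyRange kmin (kmax + 1) 1).flatMap
      (fun k => (PySem.List.pyRange 0 (k + 1) 1).map (fun n => (k, n)))
  pairs.foldl (fun (p : List Int × List Int) kn => (p.1 ++ [kn.1], p.2 ++ [kn.2])) ([], [])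

-- ===== PRECONDITION & SPEC =====
def Spec_kmvec (kmin : Int) (kmax : Int) (out : List Int × List Int) : Prop := out = kmvec_alt kmin kmax
instance (kmin : Int) (kmax : Int) (out : List Int × List Int) : Decidable (Spec_kmvec kmin kmax out) := by unfold Spec_kmvec; infer_instance

-- ===== CLAIM =====
def Claim_equal_kmvec : Prop := ∀ (kmin : Int) (kmax : Int), Dom_kmvec kmin kmax → Spec_kmvec kmin kmax (kmvec kmin kmax)

-- ===== LEMMAS AND PROOFS =====

-- the constant-k maps over the two inner ranges agree (both ranges have length max(0,k+1))
theorem map_const_ranges (k : Int) :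
    (PySem.List.pyRange 1 (k + 2) 1).map (fun _ => k)
      = (PySem.List.pyRange 0 (k + 1) 1).map (fun _ => k) := by
  rw [List.map_const', List.map_const', PySem.List.length_pyRange_one, PySem.List.length_pyRange_one]
  congr 1
  omega

-- ===== VERDICT =====
theorem kmvec_spec : Claim_equal_kmvec := by
  intro kmin kmax _
  unfold Spec_kmvec kmvec kmvec_alt
  rw [PySem.List.foldl_prod_mk (f := fun acc (kn : Int × Int) => acc ++ [kn.1])
      (g := fun acc (kn : Int × Int) => acc ++ [kn.2])]
  simp only [PySem.List.foldl_append_singleton_eq_map,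
    PySem.List.foldl_append_eq_flatMap, List.nil_append, List.map_flatMap, List.map_map,
    Prod.mk.injEq]
  constructor
  · refine List.flatMap_congr (fun k _ => ?_)
    simp only [map_const_ranges k]
    simp
  · refine List.flatMap_congr (fun k _ => ?_)
    simp
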